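-- pv_equiv track=rewrite | github.com/gino79445/base_proposal | base_proposal/base_proposal/tasks/utils/rrt_utils.py | is_valid_des
-- ===== SOURCE A (Python) =====
-- import math
--
-- def is_valid_des(x, y, map, radius=9):
--     r_int = math.ceil(radius)
--     for i in range(-r_int, r_int + 1):
--         for j in range(-r_int, r_int + 1):
--             # ✅ 只檢查圓形內的點 (i, j)
--             if i**2 + j**2 > radius**2:
--                 continue  # 忽略圓外的格子
--
--             # ✅ 檢查是否超出邊界或為障礙物
--             if (
--                 x + i < 0
--                 or y + j < 0
--                 or x + i >= len(map)
--                 or y + j >= len(map[0])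
--                 or map[x + i][y + j] != 0
--             ):
--                 return False
--     return True
-- ===== SOURCE B (Python) =====
-- import math
--
-- def is_valid_des(x, y, map, radius=9):
--     r = math.ceil(radius)
--     if r < 0:
--         return True  # empty offset range: nothing to check
--     # Bounds phase: the disc's extreme cells are (x-r, y), (x+r, y), (x, y-r), (x, y+r),
--     # so the whole disc fits the grid iff these four indices do.
--     if x - r < 0 or x + r >= len(map):
--         return False
--     if y - r < 0 or y + r >= len(map[0]):
--         return False
--     # Obstacle phase: each disc row is a contiguous slice; it must contain no nonzero cell.
--     for d, row in enumerate(map[x - r: x + r + 1]):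
--         s = math.isqrt(r * r - (d - r) * (d - r))
--         if any(row[y - s: y + s + 1]):
--             return False
--     return True
-- ===== Notes on version B (the rewrite author's own statement) =====
-- stated objective: faster
-- what changed: A scans the full (2r+1)x(2r+1) square, filters each cell with i^2+j^2>radius^2 and re-checks all four bounds per cell; B is two analytic phases: a closed-form bounds test on the disc's four extreme cells (no per-cell bound checks, out-of-bounds returns False without touching the grid), then per-row contiguous disc slices (span from math.isqrt) tested wholesale with any().
-- outside the precondition, e.g. on is_valid_des(1, 1, [[0, 0, 0], [5, 0], [0, 0, 0]], 1): A returns False, B returns False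
import Mathlib
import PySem

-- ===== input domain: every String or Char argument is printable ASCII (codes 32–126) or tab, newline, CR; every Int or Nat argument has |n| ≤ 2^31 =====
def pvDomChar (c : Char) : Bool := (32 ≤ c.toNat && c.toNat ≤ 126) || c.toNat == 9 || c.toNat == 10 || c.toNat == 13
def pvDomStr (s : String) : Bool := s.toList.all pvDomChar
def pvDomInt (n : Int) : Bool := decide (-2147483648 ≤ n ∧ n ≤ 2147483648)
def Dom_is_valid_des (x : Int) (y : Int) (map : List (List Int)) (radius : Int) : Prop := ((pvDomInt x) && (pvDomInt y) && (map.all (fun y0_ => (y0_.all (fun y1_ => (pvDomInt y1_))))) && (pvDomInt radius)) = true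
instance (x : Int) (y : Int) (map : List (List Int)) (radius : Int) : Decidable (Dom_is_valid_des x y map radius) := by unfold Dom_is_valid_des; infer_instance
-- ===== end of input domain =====

-- B replaces A's filtered square scan by two analytic phases: a closed-form bounds test on the
-- disc's four extreme cells, then per-row contiguous disc slices checked with any();
-- return value only, no mutation.

-- map[a][b] (the indices are guarded before the value matters)
def pvCell (map : List (List Int)) (a b : Int) : Int :=
  (PySem.List.pyGet? ((PySem.List.pyGet? map a).getD []) b).getD 0

-- ===== PORT A =====
def is_valid_des (x : Int) (y : Int) (map : List (List Int)) (radius : Int) : Bool :=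
  let r_int := radius  -- math.ceil of an int is the int itself
  (PySem.List.pyRange (-r_int) (r_int + 1) 1).all (fun i =>
    (PySem.List.pyRange (-r_int) (r_int + 1) 1).all (fun j =>
      if i ^ 2 + j ^ 2 > radius ^ 2 then true  -- continue: cell outside the circle
      else
        !(decide (x + i < 0) || decide (y + j < 0) ||
          decide (x + i ≥ (map.length : Int)) ||
          decide (y + j ≥ ((map.headD []).length : Int)) ||
          decide (pvCell map (x + i) (y + j) ≠ 0))))

-- ===== PORT B =====
def is_valid_des_alt (x : Int) (y : Int) (map : List (List Int)) (radius : Int) : Bool :=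
  let r := radius  -- math.ceil of an int is the int itself
  if r < 0 then true  -- empty offset range: nothing to check
  -- bounds phase: the disc's extreme cells are (x±r, y) and (x, y±r)
  else if x - r < 0 ∨ (map.length : Int) ≤ x + r then false
  else if y - r < 0 ∨ ((map.headD []).length : Int) ≤ y + r then false
  else
    -- obstacle phase: each disc row is a contiguous slice; it must contain no nonzero cell
    (PySem.List.enumerate (PySem.List.slice map (some (x - r)) (some (x + r + 1)))).all
      (fun p =>
        let s : Int := (Nat.sqrt ((r * r - (p.1 - r) * (p.1 - r)).toNat) : Int)  -- math.isqrt
        !((PySem.List.slice p.2 (some (y - s)) (some (y + s + 1))).any (fun v => decide (v ≠ 0))))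

-- ===== PRECONDITION & SPEC =====
-- Pre_ excludes ragged maps on which some disc row is shorter than the first row's in-disc extent:
-- there Python A raises IndexError (or, when a nonzero cell precedes the short access, happens to
-- return False, which B also returns); B slices and never raises.
def Pre_is_valid_des (x : Int) (y : Int) (map : List (List Int)) (radius : Int) : Prop :=
  radius < 0 ∨ x - radius < 0 ∨ (map.length : Int) ≤ x + radius ∨
  y - radius < 0 ∨ ((map.headD []).length : Int) ≤ y + radius ∨
  ∀ i ∈ PySem.List.pyRange (-radius) (radius + 1) 1,
    y + (Nat.sqrt ((radius * radius - i * i).toNat) : Int) < ((map.getD (x + i).toNat []).length : Int)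
instance (x : Int) (y : Int) (map : List (List Int)) (radius : Int) : Decidable (Pre_is_valid_des x y map radius) := by unfold Pre_is_valid_des; infer_instance

def pvWitness_is_valid_des : Int × Int × List (List Int) × Int := (1, 1, [[0,0,0],[0,0,0],[0,0,0]], 1)

def Spec_is_valid_des (x : Int) (y : Int) (map : List (List Int)) (radius : Int) (out : Bool) : Prop := out = is_valid_des_alt x y map radius
instance (x : Int) (y : Int) (map : List (List Int)) (radius : Int) (out : Bool) : Decidable (Spec_is_valid_des x y map radius out) := by unfold Spec_is_valid_des; infer_instance

-- ===== CLAIM (what is proved, stated in full; the proofs are below) =====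
def Claim_equal_is_valid_des : Prop := ∀ (x : Int) (y : Int) (map : List (List Int)) (radius : Int), Dom_is_valid_des x y map radius → Pre_is_valid_des x y map radius → Spec_is_valid_des x y map radius (is_valid_des x y map radius)

-- ===== LEMMAS AND PROOFS =====

-- the exact circle test equals the per-row integer-sqrt span bound
lemma circle_span (R i j : Int) (hi : -R ≤ i ∧ i ≤ R) :
    ((-R ≤ j ∧ j ≤ R) ∧ i * i + j * j ≤ R * R) ↔
    (-(Nat.sqrt ((R * R - i * i).toNat) : Int) ≤ j ∧ j ≤ (Nat.sqrt ((R * R - i * i).toNat) : Int)) := by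
  obtain ⟨hi1, hi2⟩ := hi
  have hR : 0 ≤ R := by omega
  have hii : i * i ≤ R * R := by nlinarith [hi1, hi2]
  have hK : ((R * R - i * i).toNat : Int) = R * R - i * i := Int.toNat_of_nonneg (by omega)
  set m : Nat := Nat.sqrt ((R * R - i * i).toNat) with hm
  have hs1 : m ^ 2 ≤ (R * R - i * i).toNat := Nat.sqrt_le' _
  have hs1' : (m : Int) * m ≤ R * R - i * i := by
    calc ((m : Int) * m) = ((m * m : Nat) : Int) := by push_cast; ring
    _ ≤ ((R * R - i * i).toNat : Int) := by have := hs1; push_cast at this ⊢; nlinarith [this]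
    _ = R * R - i * i := hK
  constructor
  · rintro ⟨_, hcirc⟩
    have hjq : j * j ≤ R * R - i * i := by nlinarith [hcirc]
    have h1 : j.natAbs * j.natAbs ≤ (R * R - i * i).toNat := by
      have hjj : j * j = ((j.natAbs * j.natAbs : Nat) : Int) := by
        push_cast; rw [← Int.natAbs_mul_self]; push_cast; ring
      have : ((j.natAbs * j.natAbs : Nat) : Int) ≤ ((R * R - i * i).toNat : Int) := by
        rw [← hjj, hK]; exact hjq
      exact_mod_cast this
    have h2 : j.natAbs ≤ m := Nat.le_sqrt.mpr h1
    omega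
  · rintro ⟨h1, h2⟩
    have hmR : (m : Int) ≤ R := by
      by_contra hlt
      push_neg at hlt
      nlinarith [hs1', hii]
    have hjm : j * j ≤ (m : Int) * m := by nlinarith [h1, h2]
    refine ⟨⟨by omega, by omega⟩, by nlinarith [hjm, hs1']⟩

lemma span_le (R i : Int) (hR : 0 ≤ R) (hi1 : -R ≤ i) (hi2 : i ≤ R) :
    (Nat.sqrt ((R * R - i * i).toNat) : Int) ≤ R := by
  have hii : i * i ≤ R * R := by nlinarith
  have hK : ((R * R - i * i).toNat : Int) = R * R - i * i := Int.toNat_of_nonneg (by omega)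
  set m : Nat := Nat.sqrt ((R * R - i * i).toNat) with hm
  have hs1 : m ^ 2 ≤ (R * R - i * i).toNat := Nat.sqrt_le' _
  have hs1' : (m : Int) * m ≤ R * R - i * i := by
    calc ((m : Int) * m) = ((m * m : Nat) : Int) := by push_cast; ring
    _ ≤ ((R * R - i * i).toNat : Int) := by have := hs1; push_cast at this ⊢; nlinarith [this]
    _ = R * R - i * i := hK
  by_contra hlt
  push_neg at hlt
  nlinarith [hs1']

lemma getElem_slice {α : Type} (l : List α) (a b : Int) (h0 : 0 ≤ a) (hb : 0 ≤ b) (k : Nat)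
    (hk : k < (PySem.List.slice l (some a) (some b)).length)
    (hk2 : a.toNat + k < l.length) :
    (PySem.List.slice l (some a) (some b))[k] = l[a.toNat + k] := by
  simp only [PySem.List.slice_toNat l h0 hb] at hk ⊢
  rw [List.getElem_take, List.getElem_drop]

lemma mem_slice_iff {α : Type} (l : List α) (a b : Int) (h0 : 0 ≤ a) (hab : a ≤ b)
    (hb : b ≤ (l.length : Int)) (v : α) :
    v ∈ PySem.List.slice l (some a) (some b) ↔
    ∃ t : Int, a ≤ t ∧ t < b ∧ PySem.List.pyGet? l t = some v := by
  rw [PySem.List.slice_toNat l h0 (le_trans h0 hab)]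
  rw [List.mem_iff_getElem]
  constructor
  · rintro ⟨k, hk, hkv⟩
    simp only [List.length_take, List.length_drop, lt_min_iff] at hk
    have hget : ((l.drop a.toNat).take (b.toNat - a.toNat))[k]'(by simp [List.length_take, List.length_drop]; omega) = l[a.toNat + k]'(by omega) := by
      rw [List.getElem_take, List.getElem_drop]
    refine ⟨a + k, by omega, by omega, ?_⟩
    rw [PySem.List.pyGet?_eq_some_getElem l (by omega) (by omega)]
    have : (a + (k : Int)).toNat = a.toNat + k := by omega
    rw [hget] at hkv
    simp [this, hkv]
  · rintro ⟨t, ht1, ht2, hget⟩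
    have htl : t < (l.length : Int) := lt_of_lt_of_le ht2 hb
    rw [PySem.List.pyGet?_eq_some_getElem l (by omega) htl] at hget
    refine ⟨t.toNat - a.toNat, by simp [List.length_take, List.length_drop]; omega, ?_⟩
    rw [List.getElem_take, List.getElem_drop]
    have : a.toNat + (t.toNat - a.toNat) = t.toNat := by omega
    simp_all

lemma A_true_iff (x y : Int) (map : List (List Int)) (radius : Int) :
    is_valid_des x y map radius = true ↔
    ∀ i j : Int, -radius ≤ i → i ≤ radius → -radius ≤ j → j ≤ radius →
      i * i + j * j ≤ radius * radius →
      0 ≤ x + i ∧ x + i < (map.length : Int) ∧ 0 ≤ y + j ∧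
        y + j < ((map.headD []).length : Int) ∧ pvCell map (x + i) (y + j) = 0 := by
  simp only [is_valid_des, List.all_eq_true, PySem.List.mem_pyRange_one]
  constructor
  · intro h i j hi1 hi2 hj1 hj2 hc
    have hh := h i ⟨hi1, by omega⟩ j ⟨hj1, by omega⟩
    rw [if_neg (by push_neg; nlinarith [hc])] at hh
    simp only [Bool.not_eq_eq_eq_not, Bool.not_true, Bool.or_eq_false_iff,
      decide_eq_false_iff_not, not_lt, not_le, not_not] at hh
    refine ⟨by omega, by omega, by omega, by omega, ?_⟩
    tauto
  · intro h i hi j hj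
    by_cases hc : i ^ 2 + j ^ 2 > radius ^ 2
    · rw [if_pos hc]
    · rw [if_neg hc]
      have hc' : i * i + j * j ≤ radius * radius := by nlinarith [not_lt.mp hc]
      obtain ⟨h1, h2, h3, h4, h5⟩ := h i j hi.1 (by omega) hj.1 (by omega) hc'
      simp only [Bool.not_eq_eq_eq_not, Bool.not_true, Bool.or_eq_false_iff,
        decide_eq_false_iff_not, not_lt, not_le, not_not]
      exact ⟨⟨⟨⟨by omega, by omega⟩, by omega⟩, by omega⟩, h5⟩

lemma B_true_iff (x y : Int) (map : List (List Int)) (radius : Int) (hr : 0 ≤ radius)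
    (hx1 : 0 ≤ x - radius) (hx2 : x + radius < (map.length : Int))
    (hy1 : 0 ≤ y - radius) (hy2 : y + radius < ((map.headD []).length : Int))
    (hrows : ∀ i : Int, -radius ≤ i → i ≤ radius →
      y + (Nat.sqrt ((radius * radius - i * i).toNat) : Int) < ((map.getD (x + i).toNat []).length : Int)) :
    is_valid_des_alt x y map radius = true ↔
    ∀ i j : Int, -radius ≤ i → i ≤ radius →
      -(Nat.sqrt ((radius * radius - i * i).toNat) : Int) ≤ j →
      j ≤ (Nat.sqrt ((radius * radius - i * i).toNat) : Int) →
      pvCell map (x + i) (y + j) = 0 := by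
  unfold is_valid_des_alt
  rw [if_neg (by omega), if_neg (by omega), if_neg (by omega)]
  rw [List.all_eq_true]
  have hsllen : (PySem.List.slice map (some (x - radius)) (some (x + radius + 1))).length
      = (2 * radius + 1).toNat := by
    rw [PySem.List.slice_toNat map (by omega) (by omega)]
    simp only [List.length_take, List.length_drop]; omega
  constructor
  · intro h i j hi1 hi2 hj1 hj2
    have hsnn : (0:Int) ≤ (Nat.sqrt ((radius * radius - i * i).toNat) : Int) := by positivity
    have hsle := span_le radius i hr hi1 hi2
    have hk : (i + radius).toNat < (PySem.List.slice map (some (x - radius)) (some (x + radius + 1))).length := by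
      rw [hsllen]; omega
    have hnl : (x + i).toNat < map.length := by omega
    have hroweq : (PySem.List.slice map (some (x - radius)) (some (x + radius + 1)))[(i + radius).toNat]'hk
        = map[(x + i).toNat]'hnl := by
      rw [getElem_slice map (x - radius) (x + radius + 1) (by omega) (by omega) _ hk (by omega)]
      simp only [show (x - radius).toNat + (i + radius).toNat = (x + i).toNat from by omega]
    have hp := h (((i + radius).toNat : Int),
        (PySem.List.slice map (some (x - radius)) (some (x + radius + 1)))[(i + radius).toNat]'hk)
      ((PySem.List.mem_enumerate_iff _ 0 _).mpr ⟨(i + radius).toNat, hk, by simp⟩)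
    simp only at hp
    rw [show (((i + radius).toNat : Int)) - radius = i from by omega, hroweq] at hp
    have hrowlen : y + (Nat.sqrt ((radius * radius - i * i).toNat) : Int) < ((map[(x + i).toNat]'hnl).length : Int) := by
      have h2 := hrows i hi1 hi2
      rwa [List.getD_eq_getElem map [] hnl] at h2
    rw [Bool.not_eq_eq_eq_not, Bool.not_true, List.any_eq_false] at hp
    have hcell : PySem.List.pyGet? (map[(x + i).toNat]'hnl) (y + j) = some (pvCell map (x + i) (y + j)) := by
      rw [pvCell, PySem.List.pyGet?_eq_some_getElem map (by omega) (by omega)]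
      simp only [Option.getD_some]
      rw [PySem.List.pyGet?_eq_some_getElem _ (by omega) (by omega)]
      simp
    have hmem : pvCell map (x + i) (y + j) ∈ PySem.List.slice (map[(x + i).toNat]'hnl)
        (some (y - (Nat.sqrt ((radius * radius - i * i).toNat) : Int)))
        (some (y + (Nat.sqrt ((radius * radius - i * i).toNat) : Int) + 1)) := by
      rw [mem_slice_iff _ _ _ (by omega) (by omega) (by omega)]
      exact ⟨y + j, by omega, by omega, hcell⟩
    have := hp _ hmem
    simpa using this
  · intro h p hp
    rw [PySem.List.mem_enumerate_iff] at hp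
    obtain ⟨k, hk, hpk⟩ := hp
    have hk2 : k < (2 * radius + 1).toNat := by rw [hsllen] at hk; exact hk
    subst hpk
    simp only
    have hi1 : -radius ≤ 0 + (k : Int) - radius := by omega
    have hi2 : 0 + (k : Int) - radius ≤ radius := by omega
    have hsnn : (0:Int) ≤ (Nat.sqrt ((radius * radius - (0 + (k : Int) - radius) * (0 + (k : Int) - radius)).toNat) : Int) := by positivity
    have hsle := span_le radius (0 + (k : Int) - radius) hr hi1 hi2
    have hnl : (x + (0 + (k : Int) - radius)).toNat < map.length := by omega
    have hroweq : (PySem.List.slice map (some (x - radius)) (some (x + radius + 1)))[k]'hk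
        = map[(x + (0 + (k : Int) - radius)).toNat]'hnl := by
      rw [getElem_slice map (x - radius) (x + radius + 1) (by omega) (by omega) _ hk (by omega)]
      simp only [show (x - radius).toNat + k = (x + (0 + (k : Int) - radius)).toNat from by omega]
    rw [hroweq]
    have hrowlen : y + (Nat.sqrt ((radius * radius - (0 + (k : Int) - radius) * (0 + (k : Int) - radius)).toNat) : Int)
        < ((map[(x + (0 + (k : Int) - radius)).toNat]'hnl).length : Int) := by
      have h2 := hrows (0 + (k : Int) - radius) hi1 hi2
      rwa [List.getD_eq_getElem map [] hnl] at h2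
    rw [Bool.not_eq_eq_eq_not, Bool.not_true, List.any_eq_false]
    intro v hv
    rw [mem_slice_iff _ _ _ (by omega) (by omega) (by omega)] at hv
    obtain ⟨t, ht1, ht2, hget⟩ := hv
    have hcell : PySem.List.pyGet? (map[(x + (0 + (k : Int) - radius)).toNat]'hnl) t
        = some (pvCell map (x + (0 + (k : Int) - radius)) t) := by
      rw [pvCell, PySem.List.pyGet?_eq_some_getElem map (by omega) (by omega)]
      simp only [Option.getD_some]
      rw [PySem.List.pyGet?_eq_some_getElem _ (by omega) (by omega)]
      simp
    rw [hget] at hcell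
    have hv0 : v = pvCell map (x + (0 + (k : Int) - radius)) t := by injection hcell
    have hz := h (0 + (k : Int) - radius) (t - y) hi1 hi2 (by omega) (by omega)
    rw [show y + (t - y) = t from by omega] at hz
    simp [hv0.trans hz]

-- the two programs agree on every input satisfying Pre_
lemma ports_eq (x y : Int) (map : List (List Int)) (radius : Int)
    (hpre : Pre_is_valid_des x y map radius) :
    is_valid_des x y map radius = is_valid_des_alt x y map radius := by
  by_cases hneg : radius < 0
  · -- empty offset range on both sides
    simp only [is_valid_des, is_valid_des_alt]
    rw [PySem.List.pyRange_one_eq_nil (by omega), if_pos hneg]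
    rfl
  · have hr : 0 ≤ radius := by omega
    by_cases hbx : x - radius < 0 ∨ (map.length : Int) ≤ x + radius
    · have hB : is_valid_des_alt x y map radius = false := by
        unfold is_valid_des_alt
        rw [if_neg hneg, if_pos hbx]
      have hA : is_valid_des x y map radius = false := by
        rw [Bool.eq_false_iff]
        intro hall
        rw [A_true_iff] at hall
        rcases hbx with h1 | h1
        · have := (hall (-radius) 0 (by omega) (by omega) (by omega) (by omega) (by nlinarith)).1
          omega
        · have := (hall radius 0 (by omega) (by omega) (by omega) (by omega) (by nlinarith)).2.1
          omega
      rw [hA, hB]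
    · by_cases hby : y - radius < 0 ∨ ((map.headD []).length : Int) ≤ y + radius
      · have hB : is_valid_des_alt x y map radius = false := by
          unfold is_valid_des_alt
          rw [if_neg hneg, if_neg hbx, if_pos hby]
        have hA : is_valid_des x y map radius = false := by
          rw [Bool.eq_false_iff]
          intro hall
          rw [A_true_iff] at hall
          rcases hby with h1 | h1
          · have := (hall 0 (-radius) (by omega) (by omega) (by omega) (by omega) (by nlinarith)).2.2.1
            omega
          · have := (hall 0 radius (by omega) (by omega) (by omega) (by omega) (by nlinarith)).2.2.2.1
            omega
        rw [hA, hB]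
      · -- bounds good: Pre_ supplies the row lengths, the characterisations meet via circle_span
        have hrows : ∀ i : Int, -radius ≤ i → i ≤ radius →
            y + (Nat.sqrt ((radius * radius - i * i).toNat) : Int) < ((map.getD (x + i).toNat []).length : Int) := by
          rcases hpre with h | h | h | h | h | h
          · omega
          · exact absurd (Or.inl h) hbx
          · exact absurd (Or.inr h) hbx
          · exact absurd (Or.inl h) hby
          · exact absurd (Or.inr h) hby
          · intro i hi1 hi2
            exact h i (by rw [PySem.List.mem_pyRange_one]; omega)
        rw [Bool.eq_iff_iff,
          A_true_iff x y map radius,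
          B_true_iff x y map radius hr (by omega) (by omega) (by omega) (by omega) hrows]
        constructor
        · intro hA i j hi1 hi2 hj1 hj2
          obtain ⟨⟨hjr1, hjr2⟩, hcirc⟩ := (circle_span radius i j ⟨hi1, hi2⟩).mpr ⟨hj1, hj2⟩
          exact (hA i j hi1 hi2 hjr1 hjr2 hcirc).2.2.2.2
        · intro hB i j hi1 hi2 hj1 hj2 hc
          obtain ⟨hs1, hs2⟩ := (circle_span radius i j ⟨hi1, hi2⟩).mp ⟨⟨hj1, hj2⟩, hc⟩
          have hsle := span_le radius i hr hi1 hi2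
          exact ⟨by omega, by omega, by omega, by omega, hB i j hi1 hi2 hs1 hs2⟩

-- ===== VERDICT (by name: the statement is the Claim_ definition above) =====
theorem is_valid_des_spec : Claim_equal_is_valid_des := by
  intro x y map radius _ hpre
  unfold Spec_is_valid_des
  exact ports_eq x y map radius hpre
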